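-- pv_equiv track=rewrite | github.com/ryaneunderwood/Pokemon-Sunday-Dev | patch_scripts_rxdata.py | marshal_decode_int_at
-- ===== SOURCE A (Python) =====
-- def marshal_decode_int_at(data, pos):
--     """Decode Ruby Marshal compact integer at pos. Returns (value, bytes_consumed)."""
--     b = data[pos]
--     if b == 0:
--         return 0, 1
--     elif b <= 4:
--         # b bytes follow, little-endian
--         n = 0
--         for i in range(b):
--             n |= data[pos + 1 + i] << (8 * i)
--         return n, 1 + b
--     elif b >= 0xfc:  # negative, b bytes of negative
--         count = 256 - b
--         n = -1
--         for i in range(count):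
--             n &= ~(0xff << (8 * i))
--             n |= data[pos + 1 + i] << (8 * i)
--         return n, 1 + count
--     elif b >= 0x80:
--         return b - 256 - 5, 1  # small negative
--     else:
--         return b - 5, 1  # small positive (b >= 6)
-- ===== SOURCE B (Python) =====
-- def marshal_decode_int_at(data, pos):
--     """Decode Ruby Marshal compact integer at pos. Returns (value, bytes_consumed)."""
--     b = data[pos]
--     if b == 0:
--         return 0, 1
--     elif b <= 4:
--         # b bytes follow, little-endian
--         n = int.from_bytes(bytes(data[pos + 1:pos + 1 + b]), 'little')
--         return n, 1 + b
--     elif b >= 0xfc:  # negative: build the positive magnitude, then subtract 256^count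
--         count = 256 - b
--         m = int.from_bytes(bytes(data[pos + 1:pos + 1 + count]), 'little')
--         return m - (1 << (8 * count)), 1 + count
--     elif b >= 0x80:
--         return b - 256 - 5, 1  # small negative
--     else:
--         return b - 5, 1  # small positive (b >= 6)
-- ===== Notes on version B (the rewrite author's own statement) =====
-- stated objective: simpler
-- what changed: Both multi-byte branches replace A's per-byte bit loops by one closed-form conversion: the positive branch is int.from_bytes(..., 'little'), and the negative branch builds the positive little-endian magnitude m and returns m - 2^(8*count) instead of A's loop that clears one byte of -1 with a mask and ORs the byte in.
-- outside the precondition, e.g. on marshal_decode_int_at([1, 7], -2): A returns (7, 2), B returns (0, 2); on marshal_decode_int_at([-5, 9, 9, 9, 9, 9], 0): A returns (0, -4), B returns (9, -4); on marshal_decode_int_at([300], 0): A returns (-1, -43), B raises ValueError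
import Mathlib
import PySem

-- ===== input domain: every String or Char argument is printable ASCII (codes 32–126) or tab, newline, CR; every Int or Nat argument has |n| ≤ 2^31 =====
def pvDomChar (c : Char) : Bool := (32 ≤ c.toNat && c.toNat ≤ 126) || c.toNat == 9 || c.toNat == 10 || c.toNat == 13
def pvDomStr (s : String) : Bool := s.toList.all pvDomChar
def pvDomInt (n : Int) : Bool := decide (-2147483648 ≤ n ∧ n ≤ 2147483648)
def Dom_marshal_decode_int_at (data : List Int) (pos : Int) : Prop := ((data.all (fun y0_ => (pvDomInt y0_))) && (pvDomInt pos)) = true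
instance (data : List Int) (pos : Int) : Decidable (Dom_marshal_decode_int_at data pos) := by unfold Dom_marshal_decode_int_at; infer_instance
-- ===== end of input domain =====

-- B replaces A's per-byte bit-masking loops by closed-form little-endian conversion:
-- positive tags become int.from_bytes of the byte window, negative tags build the
-- positive magnitude m and return m - 2^(8*count) instead of masking bytes out of -1.

-- ===== PORT A =====
def marshal_decode_int_at (data : List Int) (pos : Int) : Int × Int :=
  let b := PySem.List.pyGetD data pos 0
  if b = 0 then (0, 1)
  else if b ≤ 4 then
    let n := (PySem.List.pyRange 0 b 1).foldl
      (fun n i => PySem.Int.bor n ((PySem.List.pyGetD data (pos + 1 + i) 0) <<< (8 * i).toNat)) 0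
    (n, 1 + b)
  else if 252 ≤ b then
    let count := 256 - b
    let n := (PySem.List.pyRange 0 count 1).foldl
      (fun n i => PySem.Int.bor
        (PySem.Int.band n (Int.not ((255 : Int) <<< (8 * i).toNat)))
        ((PySem.List.pyGetD data (pos + 1 + i) 0) <<< (8 * i).toNat)) (-1)
    (n, 1 + count)
  else if 128 ≤ b then (b - 256 - 5, 1)
  else (b - 5, 1)

-- ===== PORT B =====
-- int.from_bytes(bs, 'little') for a little-endian byte list
def pvFromBytesLE (bs : List Int) : Int := bs.foldr (fun d acc => d + 256 * acc) 0

def marshal_decode_int_at_alt (data : List Int) (pos : Int) : Int × Int :=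
  let b := PySem.List.pyGetD data pos 0
  if b = 0 then (0, 1)
  else if b ≤ 4 then
    (pvFromBytesLE (PySem.List.slice data (some (pos + 1)) (some (pos + 1 + b))), 1 + b)
  else if 252 ≤ b then
    let count := 256 - b
    (pvFromBytesLE (PySem.List.slice data (some (pos + 1)) (some (pos + 1 + count)))
       - ((1 : Int) <<< (8 * count).toNat), 1 + count)
  else if 128 ≤ b then (b - 256 - 5, 1)
  else (b - 5, 1)

-- ===== PRECONDITION & SPEC =====
-- Pre_ excludes: pos outside [-len, len) (A raises IndexError); a tag byte above 255 or a
-- non-byte value in a consumed multi-byte window (data is a byte buffer; there A's bitwise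
-- values are accidental and B raises ValueError), and a multi-byte window running past the
-- end (A raises IndexError); a multi-byte tag at negative pos, where A's per-access index
-- wraparound reads a window wrapping from the end to the front of the buffer (a corner no
-- byte decoder specifies, and B's slice does not wrap); and a negative tag whose b <= 4
-- branch makes B's slice non-empty while A reads nothing — cites in the claim.
def Pre_marshal_decode_int_at (data : List Int) (pos : Int) : Prop :=
  -(data.length : Int) ≤ pos ∧ pos < (data.length : Int) ∧
  PySem.List.pyGetD data pos 0 ≤ 255 ∧
  (PySem.List.pyGetD data pos 0 < 0 →
    PySem.List.clampIdx data.length (pos + 1 + PySem.List.pyGetD data pos 0) ≤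
      PySem.List.clampIdx data.length (pos + 1)) ∧
  (1 ≤ PySem.List.pyGetD data pos 0 ∧ PySem.List.pyGetD data pos 0 ≤ 4 →
    0 ≤ pos ∧ pos + 1 + PySem.List.pyGetD data pos 0 ≤ (data.length : Int) ∧
    ∀ i : Nat, i < (PySem.List.pyGetD data pos 0).toNat →
      0 ≤ data.getD (pos.toNat + 1 + i) 0 ∧ data.getD (pos.toNat + 1 + i) 0 ≤ 255) ∧
  (252 ≤ PySem.List.pyGetD data pos 0 →
    0 ≤ pos ∧ pos + 1 + (256 - PySem.List.pyGetD data pos 0) ≤ (data.length : Int) ∧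
    ∀ i : Nat, i < (256 - PySem.List.pyGetD data pos 0).toNat →
      0 ≤ data.getD (pos.toNat + 1 + i) 0 ∧ data.getD (pos.toNat + 1 + i) 0 ≤ 255)
instance (data : List Int) (pos : Int) : Decidable (Pre_marshal_decode_int_at data pos) := by
  unfold Pre_marshal_decode_int_at; infer_instance

def pvWitness_marshal_decode_int_at : List Int × Int := ([1, 7], 0)

def Spec_marshal_decode_int_at (data : List Int) (pos : Int) (out : Int × Int) : Prop := out = marshal_decode_int_at_alt data pos
instance (data : List Int) (pos : Int) (out : Int × Int) : Decidable (Spec_marshal_decode_int_at data pos out) := by unfold Spec_marshal_decode_int_at; infer_instance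

-- ===== CLAIM (what is proved, stated in full; the proofs are below) =====
def Claim_equal_marshal_decode_int_at : Prop := ∀ (data : List Int) (pos : Int), Dom_marshal_decode_int_at data pos → Pre_marshal_decode_int_at data pos → Spec_marshal_decode_int_at data pos (marshal_decode_int_at data pos)

-- ===== LEMMAS AND PROOFS =====

theorem pv_int_not (x : Int) : Int.not x = -x - 1 := by
  cases x with
  | ofNat n => simp [Int.not, Int.negSucc_eq]; ring
  | negSucc n => simp [Int.not, Int.negSucc_eq]

-- low bits below k AND anything shifted by k is 0
theorem pv_and_shift_zero {x d k : Nat} (h : x < 2 ^ k) : x &&& (d <<< k) = 0 := by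
  apply Nat.eq_of_testBit_eq
  intro j
  simp only [Nat.testBit_and, Nat.testBit_shiftLeft, Nat.zero_testBit]
  rcases lt_or_ge j k with hj | hj
  · simp [Nat.not_le.mpr hj]
  · have : x < 2 ^ j := lt_of_lt_of_le h (Nat.pow_le_pow_right (by norm_num) hj)
    simp [Nat.testBit_lt_two_pow this]

-- disjoint OR is addition
theorem pv_or_shift_add {x d k : Nat} (h : x < 2 ^ k) : x ||| (d <<< k) = x + d * 2 ^ k := by
  rw [Nat.lor_comm, ← Nat.shiftLeft_add_eq_or_of_lt h, Nat.shiftLeft_eq]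
  omega

theorem pv_t1_and {x d k : Nat} (hx : x < 2 ^ k) (hd : d < 256) :
    (x + 255 * 2 ^ k) &&& (d <<< k) = d <<< k := by
  have h255 : (x + 255 * 2 ^ k) = x ||| (255 <<< k) := by
    rw [pv_or_shift_add hx]
  rw [h255, Nat.and_or_distrib_right, pv_and_shift_zero hx, ← Nat.shiftLeft_and_distrib]
  have : 255 &&& d = d := by
    rw [Nat.land_comm]
    exact Nat.and_two_pow_sub_one_of_lt_two_pow (n := 8) hd
  rw [this, Nat.zero_or]

theorem pv_pos_step (m d : Int) (k : Nat) (hm0 : 0 ≤ m) (hm : m < 2 ^ k) (hd0 : 0 ≤ d) :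
    PySem.Int.bor m (d <<< k) = m + d * 2 ^ k := by
  obtain ⟨mn, rfl⟩ := Int.eq_ofNat_of_zero_le hm0
  obtain ⟨dn, rfl⟩ := Int.eq_ofNat_of_zero_le hd0
  rw [show ((dn : Int) <<< k) = ((dn <<< k : Nat) : Int) from (Int.natCast_shiftLeft dn k).symm,
    PySem.Int.bor_natCast]
  have hmn : mn < 2 ^ k := by exact_mod_cast hm
  rw [pv_or_shift_add hmn]
  push_cast [Nat.shiftLeft_eq]
  ring

theorem pv_neg_step (m d : Int) (k : Nat) (hm0 : 0 ≤ m) (hm : m < 2 ^ k)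
    (hd0 : 0 ≤ d) (hd : d ≤ 255) :
    PySem.Int.bor
      (PySem.Int.band (m - 2 ^ k) (Int.not ((255 : Int) <<< k)))
      (d <<< k) = (m + d * 2 ^ k) - 2 ^ (k + 8) := by
  obtain ⟨mn, rfl⟩ := Int.eq_ofNat_of_zero_le hm0
  obtain ⟨dn, rfl⟩ := Int.eq_ofNat_of_zero_le hd0
  have hmn : mn < 2 ^ k := by exact_mod_cast hm
  have hdn : dn < 256 := by exact_mod_cast (by omega : (dn : Int) < 256)
  have hP : ((2 : Int) ^ k) = ((2 ^ k : Nat) : Int) := by push_cast; ring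
  have h255 : ((255 : Int) <<< k) = ((255 <<< k : Nat) : Int) := by
    exact_mod_cast (Int.natCast_shiftLeft 255 k).symm
  have hdsh : ((dn : Int) <<< k) = ((dn <<< k : Nat) : Int) := (Int.natCast_shiftLeft dn k).symm
  rw [pv_int_not, hP, h255, hdsh]
  -- band of two negatives
  have hband : PySem.Int.band ((mn : Int) - ((2 ^ k : Nat) : Int)) (-(((255 <<< k : Nat)) : Int) - 1)
      = (mn : Int) - ((2 ^ (k + 8) : Nat) : Int) := by
    rw [PySem.Int.band]
    have h1 : ¬ (0 ≤ (mn : Int) - ((2 ^ k : Nat) : Int)) := by omega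
    have h2 : ¬ (0 ≤ -(((255 <<< k : Nat)) : Int) - 1) := by
      have : (0 : Int) ≤ ((255 <<< k : Nat) : Int) := by positivity
      omega
    simp only [h1, if_false]
    have e1 : (-((mn : Int) - ((2 ^ k : Nat) : Int)) - 1).toNat = 2 ^ k - 1 - mn := by omega
    have e2 : (-(-(((255 <<< k : Nat)) : Int) - 1) - 1).toNat = 255 <<< k := by omega
    rw [e1, e2]
    have hx : 2 ^ k - 1 - mn < 2 ^ k := by have := Nat.two_pow_pos k; omega
    rw [pv_or_shift_add hx]
    have : 2 ^ k - 1 - mn + 255 * 2 ^ k = 2 ^ (k + 8) - 1 - mn := by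
      have : (2 : Nat) ^ (k + 8) = 2 ^ k * 256 := by rw [pow_add]; norm_num
      omega
    rw [this]
    have hP8 : mn < 2 ^ (k + 8) := lt_of_lt_of_le hmn (Nat.pow_le_pow_right (by norm_num) (by omega))
    omega
  rw [hband, PySem.Int.bor]
  have h1 : ¬ (0 ≤ (mn : Int) - ((2 ^ (k + 8) : Nat) : Int)) := by
    have : mn < 2 ^ (k + 8) := lt_of_lt_of_le hmn (Nat.pow_le_pow_right (by norm_num) (by omega))
    omega
  have h2 : (0 : Int) ≤ ((dn <<< k : Nat) : Int) := by positivity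
  simp only [h1, h2, if_false, if_true]
  have e1 : (-((mn : Int) - ((2 ^ (k + 8) : Nat) : Int)) - 1).toNat = 2 ^ (k + 8) - 1 - mn := by
    have : mn < 2 ^ (k + 8) := lt_of_lt_of_le hmn (Nat.pow_le_pow_right (by norm_num) (by omega))
    omega
  have e2 : (((dn <<< k : Nat)) : Int).toNat = dn <<< k := by omega
  rw [e1, e2]
  have hsplit : 2 ^ (k + 8) - 1 - mn = (2 ^ k - 1 - mn) + 255 * 2 ^ k := by
    have : (2 : Nat) ^ (k + 8) = 2 ^ k * 256 := by rw [pow_add]; norm_num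
    omega
  have hx : 2 ^ k - 1 - mn < 2 ^ k := by have := Nat.two_pow_pos k; omega
  rw [hsplit, pv_t1_and hx hdn, Nat.shiftLeft_eq]
  have hP8 : ((2 : Int) ^ (k + 8)) = ((2 ^ (k + 8) : Nat) : Int) := by push_cast; ring
  have hD : ((dn : Int) * ((2 ^ k : Nat) : Int)) = ((dn * 2 ^ k : Nat) : Int) := by push_cast; ring
  rw [hP8, hD]
  have hle : dn * 2 ^ k ≤ 255 * 2 ^ k := Nat.mul_le_mul_right _ (by omega)
  have h28 : (2 : Nat) ^ (k + 8) = 2 ^ k * 256 := by rw [pow_add]; norm_num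
  have hPpos : 0 < 2 ^ k := Nat.two_pow_pos k
  -- linear arithmetic over the atoms 2^k, 2^(k+8), dn * 2^k
  omega

-- the consumed window as an indexed list
theorem pv_window (l : List Int) (j c : Nat) (h : j + c ≤ l.length) :
    (l.drop j).take c = (List.range c).map (fun i => l.getD (j + i) 0) := by
  apply List.ext_getElem
  · simp; omega
  · intro i h1 h2
    have hji : j + i < l.length := by simp at h1; omega
    simp [List.getD, List.getElem?_eq_getElem hji]

theorem pv_slice_nil {xs : List Int} {a b : Int}
    (h : PySem.List.clampIdx xs.length b ≤ PySem.List.clampIdx xs.length a) :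
    PySem.List.slice xs (some a) (some b) = [] := by
  simp [PySem.List.slice, Nat.sub_eq_zero_of_le h]

theorem pv_poschain1 (x0 : Int) (h00 : 0 ≤ x0) :
    PySem.Int.bor 0 (x0 <<< (0:Nat)) = x0 := by
  rw [pv_pos_step 0 x0 0 le_rfl (by norm_num) h00]; norm_num

theorem pv_poschain2 (x0 x1 : Int) (h00 : 0 ≤ x0) (h01 : x0 ≤ 255) (h10 : 0 ≤ x1) :
    PySem.Int.bor (PySem.Int.bor 0 (x0 <<< (0:Nat))) (x1 <<< (8:Nat)) = x0 + 256 * x1 := by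
  rw [pv_poschain1 x0 h00, pv_pos_step x0 x1 8 h00 (by norm_num; omega) h10]; norm_num; ring

theorem pv_poschain3 (x0 x1 x2 : Int) (h00 : 0 ≤ x0) (h01 : x0 ≤ 255)
    (h10 : 0 ≤ x1) (h11 : x1 ≤ 255) (h20 : 0 ≤ x2) :
    PySem.Int.bor (PySem.Int.bor (PySem.Int.bor 0 (x0 <<< (0:Nat))) (x1 <<< (8:Nat))) (x2 <<< (16:Nat))
      = x0 + 256 * x1 + 65536 * x2 := by
  rw [pv_poschain2 x0 x1 h00 h01 h10,
    pv_pos_step (x0 + 256 * x1) x2 16 (by omega) (by norm_num; omega) h20]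
  norm_num; ring

theorem pv_poschain4 (x0 x1 x2 x3 : Int) (h00 : 0 ≤ x0) (h01 : x0 ≤ 255)
    (h10 : 0 ≤ x1) (h11 : x1 ≤ 255) (h20 : 0 ≤ x2) (h21 : x2 ≤ 255) (h30 : 0 ≤ x3) :
    PySem.Int.bor (PySem.Int.bor (PySem.Int.bor (PySem.Int.bor 0 (x0 <<< (0:Nat))) (x1 <<< (8:Nat))) (x2 <<< (16:Nat))) (x3 <<< (24:Nat))
      = x0 + 256 * x1 + 65536 * x2 + 16777216 * x3 := by
  rw [pv_poschain3 x0 x1 x2 h00 h01 h10 h11 h20,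
    pv_pos_step (x0 + 256 * x1 + 65536 * x2) x3 24 (by omega) (by norm_num; omega) h30]
  norm_num; ring

theorem pv_negchain1 (x0 : Int) (h00 : 0 ≤ x0) (h01 : x0 ≤ 255) :
    PySem.Int.bor (PySem.Int.band (-1) (Int.not ((255 : Int) <<< (0:Nat)))) (x0 <<< (0:Nat))
      = x0 - 256 := by
  have h := pv_neg_step 0 x0 0 le_rfl (by norm_num) h00 h01
  rw [show (-1 : Int) = 0 - 2 ^ 0 from by norm_num, h]; norm_num

theorem pv_negchain2 (x0 x1 : Int) (h00 : 0 ≤ x0) (h01 : x0 ≤ 255)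
    (h10 : 0 ≤ x1) (h11 : x1 ≤ 255) :
    PySem.Int.bor (PySem.Int.band (PySem.Int.bor (PySem.Int.band (-1) (Int.not ((255 : Int) <<< (0:Nat)))) (x0 <<< (0:Nat)))
      (Int.not ((255 : Int) <<< (8:Nat)))) (x1 <<< (8:Nat)) = x0 + 256 * x1 - 65536 := by
  rw [pv_negchain1 x0 h00 h01]
  have h := pv_neg_step x0 x1 8 h00 (by norm_num; omega) h10 h11
  rw [show x0 - 256 = x0 - 2 ^ 8 from by norm_num, h]; norm_num; try omega

theorem pv_negchain3 (x0 x1 x2 : Int) (h00 : 0 ≤ x0) (h01 : x0 ≤ 255)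
    (h10 : 0 ≤ x1) (h11 : x1 ≤ 255) (h20 : 0 ≤ x2) (h21 : x2 ≤ 255) :
    PySem.Int.bor (PySem.Int.band
      (PySem.Int.bor (PySem.Int.band (PySem.Int.bor (PySem.Int.band (-1) (Int.not ((255 : Int) <<< (0:Nat)))) (x0 <<< (0:Nat)))
        (Int.not ((255 : Int) <<< (8:Nat)))) (x1 <<< (8:Nat)))
      (Int.not ((255 : Int) <<< (16:Nat)))) (x2 <<< (16:Nat)) = x0 + 256 * x1 + 65536 * x2 - 16777216 := by
  rw [pv_negchain2 x0 x1 h00 h01 h10 h11]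
  have h := pv_neg_step (x0 + 256 * x1) x2 16 (by omega) (by norm_num; omega) h20 h21
  rw [show x0 + 256 * x1 - 65536 = x0 + 256 * x1 - 2 ^ 16 from by norm_num, h]; norm_num; try omega

theorem pv_negchain4 (x0 x1 x2 x3 : Int) (h00 : 0 ≤ x0) (h01 : x0 ≤ 255)
    (h10 : 0 ≤ x1) (h11 : x1 ≤ 255) (h20 : 0 ≤ x2) (h21 : x2 ≤ 255)
    (h30 : 0 ≤ x3) (h31 : x3 ≤ 255) :
    PySem.Int.bor (PySem.Int.band
      (PySem.Int.bor (PySem.Int.band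
        (PySem.Int.bor (PySem.Int.band (PySem.Int.bor (PySem.Int.band (-1) (Int.not ((255 : Int) <<< (0:Nat)))) (x0 <<< (0:Nat)))
          (Int.not ((255 : Int) <<< (8:Nat)))) (x1 <<< (8:Nat)))
        (Int.not ((255 : Int) <<< (16:Nat)))) (x2 <<< (16:Nat)))
      (Int.not ((255 : Int) <<< (24:Nat)))) (x3 <<< (24:Nat))
      = x0 + 256 * x1 + 65536 * x2 + 16777216 * x3 - 4294967296 := by
  rw [pv_negchain3 x0 x1 x2 h00 h01 h10 h11 h20 h21]
  have h := pv_neg_step (x0 + 256 * x1 + 65536 * x2) x3 24 (by omega) (by norm_num; omega) h30 h31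
  rw [show x0 + 256 * x1 + 65536 * x2 - 16777216 = x0 + 256 * x1 + 65536 * x2 - 2 ^ 24 from by norm_num, h]
  norm_num; try omega

-- ===== VERDICT (by name: the statement is the Claim_ definition above) =====
theorem marshal_decode_int_at_spec : Claim_equal_marshal_decode_int_at := by
  intro data pos hdom hpre
  unfold Spec_marshal_decode_int_at
  obtain ⟨hge, hlt, hb255, hneg, hw1, hw2⟩ := hpre
  simp only [marshal_decode_int_at, marshal_decode_int_at_alt]
  split_ifs with h1 h2 h3 h4
  · rfl
  · by_cases hbneg : PySem.List.pyGetD data pos 0 < 0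
    · -- negative tag: A's loop is empty and B's slice is empty; both return (0, 1 + b)
      rw [PySem.List.pyRange_one_eq_nil (by omega), pv_slice_nil (hneg hbneg)]
      rfl
    obtain ⟨hp0, hlenI, hbytesI⟩ := hw1 ⟨by omega, h2⟩
    lift pos to ℕ using hp0 with p
    simp only [PySem.List.pyGetD_natCast] at h1 h2 hbneg ⊢
    have hlen := hlenI; have hbytes := hbytesI
    simp only [PySem.List.pyGetD_natCast, Int.toNat_natCast] at hlen hbytes
    have t1 : ((8 : Int) * 1).toNat = 8 := by decide
    have t2 : ((8 : Int) * 2).toNat = 16 := by decide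
    have t3 : ((8 : Int) * 3).toNat = 24 := by decide
    have c0 : ((p : Int)) + 1 = ((p + 1 : Nat) : Int) := by push_cast; ring
    have c1 : ((p : Int)) + 1 + 1 = ((p + 1 + 1 : Nat) : Int) := by push_cast; ring
    have c2 : ((p : Int)) + 1 + 2 = ((p + 1 + 2 : Nat) : Int) := by push_cast; ring
    have c3 : ((p : Int)) + 1 + 3 = ((p + 1 + 3 : Nat) : Int) := by push_cast; ring
    have c4 : ((p : Int)) + 1 + 4 = ((p + 1 + 4 : Nat) : Int) := by push_cast; ring
    have d1 : ((p + 1 : Nat) : Int) + 1 = ((p + 1 + 1 : Nat) : Int) := by push_cast; ring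
    have d2 : ((p + 1 : Nat) : Int) + 2 = ((p + 1 + 2 : Nat) : Int) := by push_cast; ring
    have d3 : ((p + 1 : Nat) : Int) + 3 = ((p + 1 + 3 : Nat) : Int) := by push_cast; ring
    have m0 : ((255 : Int) <<< (((0 : Nat)) : Int)) = (255 : Int) <<< (0 : Nat) := rfl
    have m8 : ((255 : Int) <<< (((8 : Nat)) : Int)) = (255 : Int) <<< (8 : Nat) := rfl
    have m16 : ((255 : Int) <<< (((16 : Nat)) : Int)) = (255 : Int) <<< (16 : Nat) := rfl
    have m24 : ((255 : Int) <<< (((24 : Nat)) : Int)) = (255 : Int) <<< (24 : Nat) := rfl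
    have hv : data.getD p 0 = 1 ∨ data.getD p 0 = 2 ∨ data.getD p 0 = 3 ∨ data.getD p 0 = 4 := by omega
    rcases hv with hv | hv | hv | hv <;> rw [hv] at hlen hbytes ⊢
    · have hwl : p + 1 + 1 ≤ data.length := by omega
      have hs : PySem.List.slice data (some ((p : Int) + 1)) (some ((p : Int) + 1 + 1)) = (data.drop (p + 1)).take 1 := by
        rw [c1, c0, PySem.List.slice_natCast]
        congr 1
        omega
      have hr : PySem.List.pyRange 0 1 1 = [0] := by decide
      rw [hr, hs, pv_window data (p + 1) 1 hwl]
      simp only [List.foldl, List.range_succ, List.range_zero, List.map, List.nil_append, pvFromBytesLE,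
        List.foldr, add_zero, mul_zero, Int.toNat_zero, c0, PySem.List.pyGetD_natCast]
      rw [pv_poschain1 (data.getD (p + 1) 0) (by simpa using (hbytes 0 (by omega)).1)]
    · have hwl : p + 1 + 2 ≤ data.length := by omega
      have hs : PySem.List.slice data (some ((p : Int) + 1)) (some ((p : Int) + 1 + 2)) = (data.drop (p + 1)).take 2 := by
        rw [c2, c0, PySem.List.slice_natCast]
        congr 1
        omega
      have hr : PySem.List.pyRange 0 2 1 = [0, 1] := by decide
      rw [hr, hs, pv_window data (p + 1) 2 hwl]
      simp only [List.foldl, List.range_succ, List.range_zero, List.map, List.nil_append, List.cons_append, pvFromBytesLE,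
        List.foldr, add_zero, mul_zero, Int.toNat_zero, c0, t1, d1, PySem.List.pyGetD_natCast]
      rw [pv_poschain2 (data.getD (p + 1) 0) (data.getD (p + 1 + 1) 0) (by simpa using (hbytes 0 (by omega)).1) (by simpa using (hbytes 0 (by omega)).2) (by simpa using (hbytes 1 (by omega)).1)]
    · have hwl : p + 1 + 3 ≤ data.length := by omega
      have hs : PySem.List.slice data (some ((p : Int) + 1)) (some ((p : Int) + 1 + 3)) = (data.drop (p + 1)).take 3 := by
        rw [c3, c0, PySem.List.slice_natCast]
        congr 1
        omega
      have hr : PySem.List.pyRange 0 3 1 = [0, 1, 2] := by decide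
      rw [hr, hs, pv_window data (p + 1) 3 hwl]
      simp only [List.foldl, List.range_succ, List.range_zero, List.map, List.nil_append, List.cons_append, pvFromBytesLE,
        List.foldr, add_zero, mul_zero, Int.toNat_zero, c0, t1, t2, d1, d2, PySem.List.pyGetD_natCast]
      rw [pv_poschain3 (data.getD (p + 1) 0) (data.getD (p + 1 + 1) 0) (data.getD (p + 1 + 2) 0) (by simpa using (hbytes 0 (by omega)).1) (by simpa using (hbytes 0 (by omega)).2) (by simpa using (hbytes 1 (by omega)).1) (by simpa using (hbytes 1 (by omega)).2) (by simpa using (hbytes 2 (by omega)).1)]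
      simp only [Prod.mk.injEq]
      exact ⟨by ring, trivial⟩
    · have hwl : p + 1 + 4 ≤ data.length := by omega
      have hs : PySem.List.slice data (some ((p : Int) + 1)) (some ((p : Int) + 1 + 4)) = (data.drop (p + 1)).take 4 := by
        rw [c4, c0, PySem.List.slice_natCast]
        congr 1
        omega
      have hr : PySem.List.pyRange 0 4 1 = [0, 1, 2, 3] := by decide
      rw [hr, hs, pv_window data (p + 1) 4 hwl]
      simp only [List.foldl, List.range_succ, List.range_zero, List.map, List.nil_append, List.cons_append, pvFromBytesLE,
        List.foldr, add_zero, mul_zero, Int.toNat_zero, c0, t1, t2, t3, d1, d2, d3, PySem.List.pyGetD_natCast]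
      rw [pv_poschain4 (data.getD (p + 1) 0) (data.getD (p + 1 + 1) 0) (data.getD (p + 1 + 2) 0) (data.getD (p + 1 + 3) 0) (by simpa using (hbytes 0 (by omega)).1) (by simpa using (hbytes 0 (by omega)).2) (by simpa using (hbytes 1 (by omega)).1) (by simpa using (hbytes 1 (by omega)).2) (by simpa using (hbytes 2 (by omega)).1) (by simpa using (hbytes 2 (by omega)).2) (by simpa using (hbytes 3 (by omega)).1)]
      simp only [Prod.mk.injEq]
      exact ⟨by ring, trivial⟩
  · obtain ⟨hp0, hlenI, hbytesI⟩ := hw2 h3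
    lift pos to ℕ using hp0 with p
    simp only [PySem.List.pyGetD_natCast] at h3 hb255 ⊢
    have hlen := hlenI; have hbytes := hbytesI
    simp only [PySem.List.pyGetD_natCast, Int.toNat_natCast] at hlen hbytes
    have t1 : ((8 : Int) * 1).toNat = 8 := by decide
    have t2 : ((8 : Int) * 2).toNat = 16 := by decide
    have t3 : ((8 : Int) * 3).toNat = 24 := by decide
    have c0 : ((p : Int)) + 1 = ((p + 1 : Nat) : Int) := by push_cast; ring
    have c1 : ((p : Int)) + 1 + 1 = ((p + 1 + 1 : Nat) : Int) := by push_cast; ring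
    have c2 : ((p : Int)) + 1 + 2 = ((p + 1 + 2 : Nat) : Int) := by push_cast; ring
    have c3 : ((p : Int)) + 1 + 3 = ((p + 1 + 3 : Nat) : Int) := by push_cast; ring
    have c4 : ((p : Int)) + 1 + 4 = ((p + 1 + 4 : Nat) : Int) := by push_cast; ring
    have d1 : ((p + 1 : Nat) : Int) + 1 = ((p + 1 + 1 : Nat) : Int) := by push_cast; ring
    have d2 : ((p + 1 : Nat) : Int) + 2 = ((p + 1 + 2 : Nat) : Int) := by push_cast; ring
    have d3 : ((p + 1 : Nat) : Int) + 3 = ((p + 1 + 3 : Nat) : Int) := by push_cast; ring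
    have m0 : ((255 : Int) <<< (((0 : Nat)) : Int)) = (255 : Int) <<< (0 : Nat) := rfl
    have m8 : ((255 : Int) <<< (((8 : Nat)) : Int)) = (255 : Int) <<< (8 : Nat) := rfl
    have m16 : ((255 : Int) <<< (((16 : Nat)) : Int)) = (255 : Int) <<< (16 : Nat) := rfl
    have m24 : ((255 : Int) <<< (((24 : Nat)) : Int)) = (255 : Int) <<< (24 : Nat) := rfl
    have hv : data.getD p 0 = 252 ∨ data.getD p 0 = 253 ∨ data.getD p 0 = 254 ∨ data.getD p 0 = 255 := by omega
    rcases hv with hv | hv | hv | hv <;> rw [hv] at hlen hbytes ⊢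
    · rw [show ((256 : Int) - 252) = 4 from by norm_num] at hlen hbytes ⊢
      have hwl : p + 1 + 4 ≤ data.length := by omega
      have hs : PySem.List.slice data (some ((p : Int) + 1)) (some ((p : Int) + 1 + 4)) = (data.drop (p + 1)).take 4 := by
        rw [c4, c0, PySem.List.slice_natCast]
        congr 1
        omega
      have hr : PySem.List.pyRange 0 4 1 = [0, 1, 2, 3] := by decide
      have tc : ((8 : Int) * 4).toNat = 32 := by decide
      have hpow : (1 : Int) <<< (32 : Nat) = 4294967296 := by decide
      rw [hr, hs, pv_window data (p + 1) 4 hwl, tc, hpow]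
      simp only [List.foldl, List.range_succ, List.range_zero, List.map, List.nil_append, List.cons_append, pvFromBytesLE,
        List.foldr, add_zero, mul_zero, Int.toNat_zero, c0, t1, t2, t3, d1, d2, d3, m0, m8, m16, m24, PySem.List.pyGetD_natCast]
      rw [pv_negchain4 (data.getD (p + 1) 0) (data.getD (p + 1 + 1) 0) (data.getD (p + 1 + 2) 0) (data.getD (p + 1 + 3) 0) (by simpa using (hbytes 0 (by omega)).1) (by simpa using (hbytes 0 (by omega)).2) (by simpa using (hbytes 1 (by omega)).1) (by simpa using (hbytes 1 (by omega)).2) (by simpa using (hbytes 2 (by omega)).1) (by simpa using (hbytes 2 (by omega)).2) (by simpa using (hbytes 3 (by omega)).1) (by simpa using (hbytes 3 (by omega)).2)]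
      simp only [Prod.mk.injEq]
      exact ⟨by ring, trivial⟩
    · rw [show ((256 : Int) - 253) = 3 from by norm_num] at hlen hbytes ⊢
      have hwl : p + 1 + 3 ≤ data.length := by omega
      have hs : PySem.List.slice data (some ((p : Int) + 1)) (some ((p : Int) + 1 + 3)) = (data.drop (p + 1)).take 3 := by
        rw [c3, c0, PySem.List.slice_natCast]
        congr 1
        omega
      have hr : PySem.List.pyRange 0 3 1 = [0, 1, 2] := by decide
      have tc : ((8 : Int) * 3).toNat = 24 := by decide
      have hpow : (1 : Int) <<< (24 : Nat) = 16777216 := by decide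
      rw [hr, hs, pv_window data (p + 1) 3 hwl, tc, hpow]
      simp only [List.foldl, List.range_succ, List.range_zero, List.map, List.nil_append, List.cons_append, pvFromBytesLE,
        List.foldr, add_zero, mul_zero, Int.toNat_zero, c0, t1, t2, d1, d2, m0, m8, m16, PySem.List.pyGetD_natCast]
      rw [pv_negchain3 (data.getD (p + 1) 0) (data.getD (p + 1 + 1) 0) (data.getD (p + 1 + 2) 0) (by simpa using (hbytes 0 (by omega)).1) (by simpa using (hbytes 0 (by omega)).2) (by simpa using (hbytes 1 (by omega)).1) (by simpa using (hbytes 1 (by omega)).2) (by simpa using (hbytes 2 (by omega)).1) (by simpa using (hbytes 2 (by omega)).2)]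
      simp only [Prod.mk.injEq]
      exact ⟨by ring, trivial⟩
    · rw [show ((256 : Int) - 254) = 2 from by norm_num] at hlen hbytes ⊢
      have hwl : p + 1 + 2 ≤ data.length := by omega
      have hs : PySem.List.slice data (some ((p : Int) + 1)) (some ((p : Int) + 1 + 2)) = (data.drop (p + 1)).take 2 := by
        rw [c2, c0, PySem.List.slice_natCast]
        congr 1
        omega
      have hr : PySem.List.pyRange 0 2 1 = [0, 1] := by decide
      have tc : ((8 : Int) * 2).toNat = 16 := by decide
      have hpow : (1 : Int) <<< (16 : Nat) = 65536 := by decide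
      rw [hr, hs, pv_window data (p + 1) 2 hwl, tc, hpow]
      simp only [List.foldl, List.range_succ, List.range_zero, List.map, List.nil_append, List.cons_append, pvFromBytesLE,
        List.foldr, add_zero, mul_zero, Int.toNat_zero, c0, t1, d1, m0, m8, PySem.List.pyGetD_natCast]
      rw [pv_negchain2 (data.getD (p + 1) 0) (data.getD (p + 1 + 1) 0) (by simpa using (hbytes 0 (by omega)).1) (by simpa using (hbytes 0 (by omega)).2) (by simpa using (hbytes 1 (by omega)).1) (by simpa using (hbytes 1 (by omega)).2)]
    · rw [show ((256 : Int) - 255) = 1 from by norm_num] at hlen hbytes ⊢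
      have hwl : p + 1 + 1 ≤ data.length := by omega
      have hs : PySem.List.slice data (some ((p : Int) + 1)) (some ((p : Int) + 1 + 1)) = (data.drop (p + 1)).take 1 := by
        rw [c1, c0, PySem.List.slice_natCast]
        congr 1
        omega
      have hr : PySem.List.pyRange 0 1 1 = [0] := by decide
      have tc : ((8 : Int) * 1).toNat = 8 := by decide
      have hpow : (1 : Int) <<< (8 : Nat) = 256 := by decide
      rw [hr, hs, pv_window data (p + 1) 1 hwl, tc, hpow]
      simp only [List.foldl, List.range_succ, List.range_zero, List.map, List.nil_append, pvFromBytesLE,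
        List.foldr, add_zero, mul_zero, Int.toNat_zero, c0, m0, PySem.List.pyGetD_natCast]
      rw [pv_negchain1 (data.getD (p + 1) 0) (by simpa using (hbytes 0 (by omega)).1) (by simpa using (hbytes 0 (by omega)).2)]

  · rfl
  · rfl
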